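-- pv_equiv track=rewrite | github.com/akvo/akvo-rag | backend/RAG_evaluation/benchmark.py | create_test_queries
-- ===== SOURCE A (Python) =====
-- from typing import Dict, List, Any, Optional
--
-- def create_test_queries(count: int) -> List[str]:
--     """Create a list of test queries for benchmarking."""
--     base_queries = [
--         "What is the living income benchmark?",
--         "How is the living income benchmark calculated?",
--         "What factors influence the living income benchmark?",
--         "How does the living income benchmark differ from minimum wage?",
--         "What is the purpose of establishing a living income benchmark?",
--         "Which countries use living income benchmarks?",
--         "How often are living income benchmarks updated?",
--         "What are the main components of a living income calculation?",
--         "How do living costs affect the living income benchmark?",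
--         "What role do living income benchmarks play in poverty reduction?"
--     ]
--
--     # Repeat and extend as needed
--     queries = []
--     for i in range(count):
--         base_query = base_queries[i % len(base_queries)]
--         if i >= len(base_queries):
--             # Add variation to avoid exact duplicates
--             queries.append(f"{base_query} (variation {i // len(base_queries) + 1})")
--         else:
--             queries.append(base_query)
--
--     return queries[:count]
-- ===== SOURCE B (Python) =====
-- def create_test_queries(count: int):
--     """Create a list of test queries for benchmarking (block-wise construction)."""
--     base_queries = [
--         "What is the living income benchmark?",
--         "How is the living income benchmark calculated?",
--         "What factors influence the living income benchmark?",
--         "How does the living income benchmark differ from minimum wage?",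
--         "What is the purpose of establishing a living income benchmark?",
--         "Which countries use living income benchmarks?",
--         "How often are living income benchmarks updated?",
--         "What are the main components of a living income calculation?",
--         "How do living costs affect the living income benchmark?",
--         "What role do living income benchmarks play in poverty reduction?"
--     ]
--     if count <= 0:
--         return []
--     blocks = -(-count // len(base_queries))  # ceil(count / len)
--     out = []
--     for b in range(blocks):
--         for q in base_queries:
--             out.append(q if b == 0 else f"{q} (variation {b + 1})")
--     return out[:count]
-- ===== Notes on version B (the rewrite author's own statement) =====
-- stated objective: alternative
-- what changed: B replaces A's single per-index loop (which computes a mod and a floor division for every index) by a block-wise construction: it computes the number of repetition blocks as the ceiling of count over the base-list length, emits each whole block of base queries with one shared variation suffix per block, and slices the result down to count.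
import Mathlib
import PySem

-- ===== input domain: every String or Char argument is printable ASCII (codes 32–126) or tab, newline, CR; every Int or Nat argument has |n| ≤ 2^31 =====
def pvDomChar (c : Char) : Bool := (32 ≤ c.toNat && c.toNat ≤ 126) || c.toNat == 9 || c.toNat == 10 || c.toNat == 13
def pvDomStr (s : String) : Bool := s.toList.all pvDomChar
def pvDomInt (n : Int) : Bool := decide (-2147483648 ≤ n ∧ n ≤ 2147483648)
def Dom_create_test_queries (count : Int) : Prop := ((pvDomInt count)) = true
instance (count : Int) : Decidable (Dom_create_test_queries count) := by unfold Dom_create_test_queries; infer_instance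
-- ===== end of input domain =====

-- B rebuilds the list block-wise (ceil(count/10) repetition blocks, then one slice) instead of A's
-- per-index loop with mod/div on every index; objective: alternative decomposition, same cost.

-- the base_queries literal both Pythons define locally
def pvBaseQueries : List String := [
  "What is the living income benchmark?",
  "How is the living income benchmark calculated?",
  "What factors influence the living income benchmark?",
  "How does the living income benchmark differ from minimum wage?",
  "What is the purpose of establishing a living income benchmark?",
  "Which countries use living income benchmarks?",
  "How often are living income benchmarks updated?",
  "What are the main components of a living income calculation?",
  "How do living costs affect the living income benchmark?",
  "What role do living income benchmarks play in poverty reduction?"]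

-- ===== PORT A =====
def create_test_queries (count : Int) : List String :=
  let base_queries := pvBaseQueries
  let queries : List String :=
    (PySem.List.pyRange 0 count 1).foldl (fun queries i =>
      -- base_queries[i % len(base_queries)]: i % 10 is always in range, so the dummy default is never used (exact)
      let base_query := PySem.List.pyGetD base_queries (PySem.Int.mod i (PySem.List.len base_queries)) ""
      if i ≥ PySem.List.len base_queries then
        queries ++ [base_query ++ " (variation " ++
          PySem.Int.toStr (PySem.Int.floordiv i (PySem.List.len base_queries) + 1) ++ ")"]
      else
        queries ++ [base_query]) []
  PySem.List.slice queries none (some count)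

-- ===== PORT B =====
def create_test_queries_alt (count : Int) : List String :=
  if count ≤ 0 then []
  else
    let blocks := -(PySem.Int.floordiv (-count) (PySem.List.len pvBaseQueries))
    let out : List String :=
      (PySem.List.pyRange 0 blocks 1).foldl (fun out b =>
        pvBaseQueries.foldl (fun out q =>
          out ++ [if b == 0 then q
                  else q ++ " (variation " ++ PySem.Int.toStr (b + 1) ++ ")"]) out) []
    PySem.List.slice out none (some count)

-- ===== PRECONDITION & SPEC =====
def Spec_create_test_queries (count : Int) (out : List String) : Prop := out = create_test_queries_alt count
instance (count : Int) (out : List String) : Decidable (Spec_create_test_queries count out) := by unfold Spec_create_test_queries; infer_instance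

-- ===== CLAIM (what is proved, stated in full; the proofs are below) =====
def Claim_equal_create_test_queries : Prop := ∀ (count : Int), Dom_create_test_queries count → Spec_create_test_queries count (create_test_queries count)

-- ===== LEMMAS AND PROOFS =====

-- the i-th query, as a pure function of the Nat index
def pvElem (i : Nat) : String :=
  if 10 ≤ i then
    pvBaseQueries.getD (i % 10) "" ++ " (variation " ++ PySem.Int.toStr ((i / 10 + 1 : Nat) : Int) ++ ")"
  else pvBaseQueries.getD (i % 10) ""

lemma pv_len_base : PySem.List.len pvBaseQueries = 10 := by decide

-- one variation block, read off the base list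
lemma pv_block_suffix (s : String) :
    (List.range 10).map (fun j => pvBaseQueries.getD j "" ++ s) = pvBaseQueries.map (· ++ s) := by
  simp [List.range_succ, pvBaseQueries]

lemma pv_A_elem (k : Nat) :
    (if (k : Int) ≥ PySem.List.len pvBaseQueries then
       PySem.List.pyGetD pvBaseQueries (PySem.Int.mod (k : Int) (PySem.List.len pvBaseQueries)) "" ++
         " (variation " ++
         PySem.Int.toStr (PySem.Int.floordiv (k : Int) (PySem.List.len pvBaseQueries) + 1) ++ ")"
     else PySem.List.pyGetD pvBaseQueries (PySem.Int.mod (k : Int) (PySem.List.len pvBaseQueries)) "")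
    = pvElem k := by
  rw [pv_len_base, pvElem]
  have h10 : (10 : Int) = ((10 : Nat) : Int) := by norm_num
  rw [h10, PySem.Int.mod_natCast, PySem.Int.floordiv_natCast, PySem.List.pyGetD_natCast]
  have hcond : ((k : Int) ≥ ((10 : Nat) : Int)) ↔ 10 ≤ k := by exact_mod_cast Iff.rfl
  by_cases h : 10 ≤ k
  · rw [if_pos (hcond.mpr h), if_pos h]
    have : ((k / 10 : Nat) : Int) + 1 = ((k / 10 + 1 : Nat) : Int) := by push_cast; ring
    rw [this]
  · rw [if_neg (fun hc => h (hcond.mp hc)), if_neg h]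

lemma pv_A_eq (c : Nat) : create_test_queries (c : Int) = (List.range c).map pvElem := by
  unfold create_test_queries
  dsimp only []
  have hfun : (fun (queries : List String) (i : Int) =>
      if i ≥ PySem.List.len pvBaseQueries then
        queries ++ [PySem.List.pyGetD pvBaseQueries (PySem.Int.mod i (PySem.List.len pvBaseQueries)) "" ++ " (variation " ++
          PySem.Int.toStr (PySem.Int.floordiv i (PySem.List.len pvBaseQueries) + 1) ++ ")"]
      else queries ++ [PySem.List.pyGetD pvBaseQueries (PySem.Int.mod i (PySem.List.len pvBaseQueries)) ""])
      = (fun (queries : List String) (i : Int) =>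
        queries ++ [if i ≥ PySem.List.len pvBaseQueries then
          PySem.List.pyGetD pvBaseQueries (PySem.Int.mod i (PySem.List.len pvBaseQueries)) "" ++
            " (variation " ++
            PySem.Int.toStr (PySem.Int.floordiv i (PySem.List.len pvBaseQueries) + 1) ++ ")"
        else PySem.List.pyGetD pvBaseQueries (PySem.Int.mod i (PySem.List.len pvBaseQueries)) ""]) := by
    funext queries i
    by_cases h : i ≥ PySem.List.len pvBaseQueries
    · rw [if_pos h, if_pos h]
    · rw [if_neg h, if_neg h]
  rw [hfun, PySem.List.pyRange_zero_nat, List.foldl_map, PySem.List.foldl_append_singleton_eq_map,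
    List.nil_append, PySem.List.slice_to _ (Int.natCast_nonneg c)]
  have hmap := List.map_congr_left (l := List.range c) (fun k _ => pv_A_elem k)
  rw [Int.toNat_natCast, hmap, List.take_of_length_le (by simp)]

lemma pv_B_blocks (B : Nat) :
    (PySem.List.pyRange 0 (B : Int) 1).foldl (fun out b =>
        pvBaseQueries.foldl (fun out q =>
          out ++ [if b == 0 then q
                  else q ++ " (variation " ++ PySem.Int.toStr (b + 1) ++ ")"]) out) []
      = (List.range (10 * B)).map pvElem := by
  induction B with
  | zero => simp [PySem.List.pyRange_one_eq_nil]
  | succ k ih =>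
    have hcast : ((k + 1 : Nat) : Int) = (k : Int) + 1 := by push_cast; ring
    rw [hcast, PySem.List.pyRange_one_succ_right (by positivity), List.foldl_append, ih]
    rw [List.foldl_cons, List.foldl_nil,
      PySem.List.foldl_append_singleton_eq_map
        (f := fun q => if (k : Int) == 0 then q
                       else q ++ " (variation " ++ PySem.Int.toStr ((k : Int) + 1) ++ ")")]
    have hr : List.range (10 * (k + 1)) = List.range (10 * k) ++ (List.range 10).map (fun j => 10 * k + j) := by
      have : 10 * (k + 1) = 10 * k + 10 := by ring
      rw [this, List.range_add]
    rw [hr, List.map_append, List.map_map]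
    congr 1
    cases k with
    | zero => decide
    | succ m =>
      have hne : (((m + 1 : Nat) : Int) == 0) = false := by
        simp; omega
      simp only [hne, Bool.false_eq_true, if_false]
      have hrhs : (List.range 10).map (pvElem ∘ fun j => 10 * (m + 1) + j)
          = (List.range 10).map (fun j => pvBaseQueries.getD j "" ++
              (" (variation " ++ PySem.Int.toStr (((m + 1 : Nat) : Int) + 1) ++ ")")) := by
        apply List.map_congr_left
        intro j hj
        have hj10 : j < 10 := List.mem_range.mp hj
        show pvElem (10 * (m + 1) + j) = _
        rw [pvElem]
        have h1 : 10 ≤ 10 * (m + 1) + j := by omega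
        have h2 : (10 * (m + 1) + j) % 10 = j := by omega
        have h3 : (10 * (m + 1) + j) / 10 + 1 = m + 2 := by omega
        rw [if_pos h1, h2, h3]
        have : ((m + 2 : Nat) : Int) = ((m + 1 : Nat) : Int) + 1 := by push_cast; ring
        rw [this]
        simp [String.append_assoc]
      rw [hrhs, pv_block_suffix]
      simp [String.append_assoc]

lemma pv_blocks_val (c : Nat) :
    -(PySem.Int.floordiv (-(c : Int)) (PySem.List.len pvBaseQueries)) = (((c + 9) / 10 : Nat) : Int) := by
  rw [pv_len_base]
  exact (PySem.Int.neg_floordiv_neg_eq_iff_of_pos (by norm_num)).mpr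
    ⟨by push_cast; omega, by push_cast; omega⟩

-- ===== VERDICT (by name: the statement is the Claim_ definition above) =====
theorem create_test_queries_spec : Claim_equal_create_test_queries := by
  intro count _
  unfold Spec_create_test_queries create_test_queries_alt
  by_cases hc : count ≤ 0
  · rw [if_pos hc]
    unfold create_test_queries
    dsimp only []
    rw [PySem.List.pyRange_one_eq_nil hc, List.foldl_nil]
    simp [PySem.List.slice]
  · rw [if_neg hc]
    dsimp only []
    replace hc : 0 < count := by omega
    obtain ⟨c, rfl⟩ : ∃ c : Nat, count = (c : Int) := ⟨count.toNat, (Int.toNat_of_nonneg hc.le).symm⟩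
    rw [pv_A_eq, pv_blocks_val c, pv_B_blocks, PySem.List.slice_to _ (Int.natCast_nonneg c),
      Int.toNat_natCast, ← List.map_take, List.take_range]
    have : min c (10 * ((c + 9) / 10)) = c := by omega
    rw [this]
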